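-- pv_equiv track=rewrite | github.com/abuhanifornob/Data-Structures-Algoritham-Python | stack.py | is_all_balance
-- ===== SOURCE A (Python) =====
-- def is_all_balance(input_star):
--     ps=list()
--     cs=list()
--     ss=list()
--     for ch in input_star:
--         if ch=='(':
--             ps.append(ch)
--         if ch=='{':
--             cs.append(ch)
--         if ch=='[':
--             ss.append(ch)
--         if ch==')':
--             if not ps:
--                 return False
--             ps.pop()
--         if ch=='}':
--             if not cs:
--                 return False
--             cs.pop()
--
--         if ch==']':
--             if not ss:
--                 return False
--             ss.pop()
--     return not cs and not ps and not ss
-- ===== SOURCE B (Python) =====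
-- def is_all_balance(input_star):
--     chars = list(input_star)
--
--     def pair_ok(opener, closer):
--         cnt = 0
--         for ch in chars:
--             if ch == opener:
--                 cnt += 1
--             elif ch == closer:
--                 if cnt == 0:
--                     return False
--                 cnt -= 1
--         return cnt == 0
--
--     return pair_ok('(', ')') and pair_ok('{', '}') and pair_ok('[', ']')
-- ===== Notes on version B (the rewrite author's own statement) =====
-- stated objective: alternative
-- what changed: A's single interleaved pass maintaining three stacks is replaced by three independent single-counter passes (one per bracket type) combined with AND.
import Mathlib
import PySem

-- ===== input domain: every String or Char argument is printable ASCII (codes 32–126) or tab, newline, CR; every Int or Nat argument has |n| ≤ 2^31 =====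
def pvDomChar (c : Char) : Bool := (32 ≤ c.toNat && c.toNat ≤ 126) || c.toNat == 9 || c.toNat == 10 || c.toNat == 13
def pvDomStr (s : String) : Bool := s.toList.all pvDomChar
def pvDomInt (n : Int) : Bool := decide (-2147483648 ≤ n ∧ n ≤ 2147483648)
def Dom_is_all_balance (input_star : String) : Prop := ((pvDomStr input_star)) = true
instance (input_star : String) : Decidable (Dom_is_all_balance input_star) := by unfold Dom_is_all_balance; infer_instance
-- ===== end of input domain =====

-- B replaces A's single pass with three stacks by three independent one-counter passes (one per bracket type) ANDed together; objective: alternative decomposition.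

-- ===== PORT A =====
-- A's loop with early returns, carried as structural recursion over the char list
-- with the three stacks ps cs ss as state (append at the end, pop = dropLast).
def isAllBalanceGo : List Char → List Char → List Char → List Char → Bool
  | [], ps, cs, ss => ((cs.isEmpty && ps.isEmpty) && ss.isEmpty)  -- "not cs and not ps and not ss"
  | ch :: t, ps, cs, ss =>
    let ps := if ch == '(' then ps ++ [ch] else ps
    let cs := if ch == '{' then cs ++ [ch] else cs
    let ss := if ch == '[' then ss ++ [ch] else ss
    if ch == ')' then
      if ps.isEmpty then false else isAllBalanceGo t ps.dropLast cs ss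
    else if ch == '}' then
      if cs.isEmpty then false else isAllBalanceGo t ps cs.dropLast ss
    else if ch == ']' then
      if ss.isEmpty then false else isAllBalanceGo t ps cs ss.dropLast
    else isAllBalanceGo t ps cs ss

def is_all_balance (input_star : String) : Bool :=
  isAllBalanceGo input_star.toList [] [] []

-- ===== PORT B =====
-- B's helper pair_ok: one pass, one integer counter.
def pairOkGo : List Char → Char → Char → Int → Bool
  | [], _, _, cnt => cnt == 0
  | ch :: t, opener, closer, cnt =>
    if ch == opener then pairOkGo t opener closer (cnt + 1)
    else if ch == closer then
      if cnt == 0 then false else pairOkGo t opener closer (cnt - 1)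
    else pairOkGo t opener closer cnt

def is_all_balance_alt (input_star : String) : Bool :=
  let chars := input_star.toList
  (pairOkGo chars '(' ')' 0 && pairOkGo chars '{' '}' 0) && pairOkGo chars '[' ']' 0

-- ===== PRECONDITION & SPEC =====
def Spec_is_all_balance (input_star : String) (out : Bool) : Prop := out = is_all_balance_alt input_star
instance (input_star : String) (out : Bool) : Decidable (Spec_is_all_balance input_star out) := by unfold Spec_is_all_balance; infer_instance

-- ===== CLAIM (what is proved, stated in full; the proofs are below) =====
def Claim_equal_is_all_balance : Prop := ∀ (input_star : String), Dom_is_all_balance input_star → Spec_is_all_balance input_star (is_all_balance input_star)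

-- ===== LEMMAS AND PROOFS =====

-- the key invariant: A's run with stacks of lengths p c s equals the AND of B's
-- three counter passes started at those counts.
lemma goA_eq (l ps cs ss : List Char) :
    isAllBalanceGo l ps cs ss =
      ((pairOkGo l '(' ')' (ps.length : Int) && pairOkGo l '{' '}' (cs.length : Int))
        && pairOkGo l '[' ']' (ss.length : Int)) := by
  induction l generalizing ps cs ss with
  | nil =>
    simp [isAllBalanceGo, pairOkGo]
    cases ps <;> cases cs <;> cases ss <;> simp <;> omega
  | cons ch t ih =>
    by_cases h1 : ch = '(' <;> by_cases h2 : ch = ')' <;> by_cases h3 : ch = '{' <;>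
      by_cases h4 : ch = '}' <;> by_cases h5 : ch = '[' <;> by_cases h6 : ch = ']' <;>
      simp_all [isAllBalanceGo, pairOkGo, List.isEmpty_iff, List.length_eq_zero_iff]
    · -- ')' case: stack nonempty matches counter nonzero
      by_cases hps : ps = []
      · subst hps; simp [pairOkGo]
      · have hl : (ps.length : Int) ≠ 0 := by
          simpa [List.length_eq_zero_iff] using hps
        have hc : ((ps.length - 1 : Nat) : Int) = (ps.length : Int) - 1 := by
          have hp : 0 < ps.length := List.length_pos_iff.mpr hps
          omega
        simp [hps, hl, hc]
    · -- '}' case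
      by_cases hcs : cs = []
      · subst hcs; simp [pairOkGo]
      · have hl : (cs.length : Int) ≠ 0 := by
          simpa [List.length_eq_zero_iff] using hcs
        have hc : ((cs.length - 1 : Nat) : Int) = (cs.length : Int) - 1 := by
          have hp : 0 < cs.length := List.length_pos_iff.mpr hcs
          omega
        simp [hcs, hl, hc]
    · -- ']' case
      by_cases hss : ss = []
      · subst hss; simp [pairOkGo]
      · have hl : (ss.length : Int) ≠ 0 := by
          simpa [List.length_eq_zero_iff] using hss
        have hc : ((ss.length - 1 : Nat) : Int) = (ss.length : Int) - 1 := by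
          have hp : 0 < ss.length := List.length_pos_iff.mpr hss
          omega
        simp [hss, hl, hc]

-- ===== VERDICT (by name: the statement is the Claim_ definition above) =====
theorem is_all_balance_spec : Claim_equal_is_all_balance := by
  intro s _
  unfold Spec_is_all_balance is_all_balance is_all_balance_alt
  simpa using goA_eq s.toList [] [] []
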